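-- pv_equiv track=rewrite | github.com/BenChenOneLab/behavior_catcher | user_class_relabel.py | fast_label_mapping
-- ===== SOURCE A (Python) =====
-- def fast_label_mapping(label_list, mapping_dict):
--     """
--     Maps a list of labels to a corresponding mapping dictionary.
--
--     Args:
--         label_list (list): A list of labels to be mapped.
--         mapping_dict (dict): A dictionary containing the mapping of labels.
--
--     Returns:
--         str: The mapped label based on the mapping dictionary.
--
--
--     """
--     try:
--         labels = [
--             mapping_dict.get(tag, "neutral")
--             for tag in label_list
--             if tag in mapping_dict
--         ]
--         if not labels:
--             return "neutral"
--         if "bad" in labels: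
--             return "bad"
--         elif "good" in labels:
--             return "good"
--         else:
--             return "neutral"
--     except:
--         return "neutral"
-- ===== SOURCE B (Python) =====
-- def fast_label_mapping(label_list, mapping_dict):
--     """Inverted index: build the key sets of 'bad' and 'good' once from the
--     mapping, then answer with two pure membership scans over label_list."""
--     try:
--         bad_keys = {k for k, v in mapping_dict.items() if v == "bad"}
--         good_keys = {k for k, v in mapping_dict.items() if v == "good"}
--         if any(t in bad_keys for t in label_list):
--             return "bad"
--         if any(t in good_keys for t in label_list):
--             return "good"
--         return "neutral"
--     except:
--         return "neutral"
-- ===== Notes on version B (the rewrite author's own statement) =====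
-- stated objective: alternative
-- what changed: Instead of filtering label_list through the dict and scanning the collected values, B inverts the mapping once into two key sets (keys mapping to 'bad' and to 'good') and then decides by plain set-membership scans of label_list, never looking a value up during the scan.
import Mathlib
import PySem

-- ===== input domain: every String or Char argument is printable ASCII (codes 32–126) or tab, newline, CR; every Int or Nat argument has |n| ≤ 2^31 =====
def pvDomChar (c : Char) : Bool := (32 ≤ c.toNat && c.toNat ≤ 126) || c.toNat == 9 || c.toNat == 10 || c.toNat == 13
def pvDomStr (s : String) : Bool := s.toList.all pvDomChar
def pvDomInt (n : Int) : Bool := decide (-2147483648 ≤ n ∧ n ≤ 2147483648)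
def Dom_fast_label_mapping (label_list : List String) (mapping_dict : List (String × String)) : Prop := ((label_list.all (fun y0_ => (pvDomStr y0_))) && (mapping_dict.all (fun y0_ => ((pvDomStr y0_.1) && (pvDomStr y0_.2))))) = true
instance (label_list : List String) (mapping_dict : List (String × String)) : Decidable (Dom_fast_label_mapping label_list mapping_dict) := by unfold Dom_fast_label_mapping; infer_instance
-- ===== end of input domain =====

-- B replaces A's filter-then-scan-values scheme by an inverted index: the key
-- sets mapping to "bad"/"good" are built once from the dict, then label_list is
-- checked by pure set membership (objective: alternative).


-- ===== PORT A =====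
def fast_label_mapping (label_list : List String) (mapping_dict : List (String × String)) : String :=
  let d := PySem.Dict.mk mapping_dict
  let labels := (label_list.filter (fun tag => d.contains tag)).map (fun tag => d.getD tag "neutral")
  if labels = [] then "neutral"
  else if "bad" ∈ labels then "bad"
  else if "good" ∈ labels then "good"
  else "neutral"

-- ===== PORT B =====
-- the set comprehension {k for k, v in mapping_dict.items() if v == target}
def invertedKeys (d : PySem.Dict String String) (target : String) : PySem.Set String :=
  PySem.Set.ofList ((d.items.filter (fun p => p.2 == target)).map Prod.fst)

def fast_label_mapping_alt (label_list : List String) (mapping_dict : List (String × String)) : String :=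
  let d := PySem.Dict.mk mapping_dict
  let badKeys := invertedKeys d "bad"
  let goodKeys := invertedKeys d "good"
  if label_list.any (fun t => PySem.Set.contains badKeys t) then "bad"
  else if label_list.any (fun t => PySem.Set.contains goodKeys t) then "good"
  else "neutral"

-- ===== PRECONDITION & SPEC =====
-- Pre_ asks the association list's keys to be distinct: a Python dict can never
-- hold duplicate keys, so duplicate-key lists represent no input A ever receives.
def Pre_fast_label_mapping (_label_list : List String) (mapping_dict : List (String × String)) : Prop :=
  (mapping_dict.map Prod.fst).Nodup
instance (label_list : List String) (mapping_dict : List (String × String)) : Decidable (Pre_fast_label_mapping label_list mapping_dict) := by unfold Pre_fast_label_mapping; infer_instance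
def pvWitness_fast_label_mapping : List String × (List (String × String)) :=
  (["a", "b"], [("a", "good"), ("b", "bad")])
def Spec_fast_label_mapping (label_list : List String) (mapping_dict : List (String × String)) (out : String) : Prop := out = fast_label_mapping_alt label_list mapping_dict
instance (label_list : List String) (mapping_dict : List (String × String)) (out : String) : Decidable (Spec_fast_label_mapping label_list mapping_dict out) := by unfold Spec_fast_label_mapping; infer_instance

-- ===== CLAIM (what is proved, stated in full; the proofs are below) =====
def Claim_equal_fast_label_mapping : Prop := ∀ (label_list : List String) (mapping_dict : List (String × String)), Dom_fast_label_mapping label_list mapping_dict → Pre_fast_label_mapping label_list mapping_dict → Spec_fast_label_mapping label_list mapping_dict (fast_label_mapping label_list mapping_dict)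

-- ===== LEMMAS AND PROOFS =====
-- membership in the inverted key set ↔ the dict maps the key to the target value
lemma mem_invertedKeys (d : PySem.Dict String String) (hnd : d.keys.Nodup)
    (v t : String) : PySem.Set.contains (invertedKeys d v) t = true ↔ d.get? t = some v := by
  rw [PySem.Set.contains_iff]
  unfold invertedKeys
  rw [PySem.Set.mem_ofList]
  simp only [List.mem_map, List.mem_filter, beq_iff_eq]
  constructor
  · rintro ⟨⟨k, w⟩, ⟨hmem, hw⟩, rfl⟩
    exact hw ▸ PySem.Dict.get?_of_mem_items d hmem hnd
  · intro h
    exact ⟨(t, v), ⟨PySem.Dict.mem_items_of_get?_eq_some d h, rfl⟩, rfl⟩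

-- the value v occurs in A's filtered value list ↔ some tag maps to v
lemma mem_labels_iff (d : PySem.Dict String String)
    (ll : List String) (v : String) :
    (v ∈ (ll.filter (fun tag => d.contains tag)).map (fun tag => d.getD tag "neutral"))
      ↔ ∃ t ∈ ll, d.contains t = true ∧ d.getD t "neutral" = v := by
  simp only [List.mem_map, List.mem_filter]
  constructor
  · rintro ⟨t, ⟨htl, hc⟩, rfl⟩
    exact ⟨t, htl, hc, rfl⟩
  · rintro ⟨t, htl, hc, hv⟩
    exact ⟨t, ⟨htl, hc⟩, hv⟩

-- `contains & getD = v` is the same statement as `get? = some v`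
lemma contains_getD_iff (d : PySem.Dict String String) (t v : String) :
    (d.contains t = true ∧ d.getD t "neutral" = v) ↔ d.get? t = some v := by
  rw [PySem.Dict.contains_eq_isSome_get?]
  cases hg : d.get? t with
  | none => simp
  | some w =>
    rw [PySem.Dict.getD_of_get?_eq_some d "neutral" hg]
    simp

lemma any_inverted_iff (d : PySem.Dict String String) (hnd : d.keys.Nodup)
    (ll : List String) (v : String) :
    (ll.any (fun t => PySem.Set.contains (invertedKeys d v) t) = true)
      ↔ ∃ t ∈ ll, d.get? t = some v := by
  rw [List.any_eq_true]
  constructor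
  · rintro ⟨t, htl, hc⟩; exact ⟨t, htl, (mem_invertedKeys d hnd v t).mp hc⟩
  · rintro ⟨t, htl, hg⟩; exact ⟨t, htl, (mem_invertedKeys d hnd v t).mpr hg⟩

lemma mem_labels_get?_iff (d : PySem.Dict String String) (ll : List String) (v : String) :
    (v ∈ (ll.filter (fun tag => d.contains tag)).map (fun tag => d.getD tag "neutral"))
      ↔ ∃ t ∈ ll, d.get? t = some v := by
  rw [mem_labels_iff]
  constructor
  · rintro ⟨t, htl, h⟩; exact ⟨t, htl, (contains_getD_iff d t v).mp h⟩
  · rintro ⟨t, htl, h⟩; exact ⟨t, htl, (contains_getD_iff d t v).mpr h⟩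

-- raw Dict.mk over a nodup-keyed list has nodup keys
lemma nodup_keys_mk (md : List (String × String)) (h : (md.map Prod.fst).Nodup) :
    (PySem.Dict.mk md).keys.Nodup := by
  have : (PySem.Dict.mk md).keys = md.map Prod.fst := rfl
  rw [this]; exact h

-- ===== VERDICT (by name: the statement is the Claim_ definition above) =====
theorem fast_label_mapping_spec : Claim_equal_fast_label_mapping := by
  intro ll md _ hpre
  unfold Spec_fast_label_mapping fast_label_mapping fast_label_mapping_alt
  have hnd : (PySem.Dict.mk md).keys.Nodup := nodup_keys_mk md hpre
  set d := PySem.Dict.mk md with hd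
  simp only []
  by_cases hb : ∃ t ∈ ll, d.get? t = some "bad"
  · rw [if_neg (List.ne_nil_of_mem ((mem_labels_get?_iff d ll "bad").mpr hb)),
      if_pos ((mem_labels_get?_iff d ll "bad").mpr hb),
      if_pos ((any_inverted_iff d hnd ll "bad").mpr hb)]
  · have hAn : "bad" ∉ (ll.filter (fun tag => d.contains tag)).map (fun tag => d.getD tag "neutral") :=
      fun h => hb ((mem_labels_get?_iff d ll "bad").mp h)
    have hBn : ¬ (ll.any (fun t => PySem.Set.contains (invertedKeys d "bad") t) = true) :=
      fun h => hb ((any_inverted_iff d hnd ll "bad").mp h)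
    by_cases hg : ∃ t ∈ ll, d.get? t = some "good"
    · rw [if_neg (List.ne_nil_of_mem ((mem_labels_get?_iff d ll "good").mpr hg)),
        if_neg hAn,
        if_pos ((mem_labels_get?_iff d ll "good").mpr hg),
        if_neg hBn,
        if_pos ((any_inverted_iff d hnd ll "good").mpr hg)]
    · have hAn' : "good" ∉ (ll.filter (fun tag => d.contains tag)).map (fun tag => d.getD tag "neutral") :=
        fun h => hg ((mem_labels_get?_iff d ll "good").mp h)
      have hBn' : ¬ (ll.any (fun t => PySem.Set.contains (invertedKeys d "good") t) = true) :=
        fun h => hg ((any_inverted_iff d hnd ll "good").mp h)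
      rw [if_neg hBn, if_neg hBn']
      by_cases he : (ll.filter (fun tag => d.contains tag)).map (fun tag => d.getD tag "neutral") = []
      · rw [if_pos he]
      · rw [if_neg he, if_neg hAn, if_neg hAn']
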